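-- pv_equiv track=rewrite | github.com/sutragraph/sutracli | src/services/agent/memory_management/memory_updater.py | _find_content_in_file
-- ===== SOURCE A (Python) =====
-- from typing import Any, Dict, List, Optional, Set, Tuple
--
-- def _find_content_in_file(
--     content_lines: List[str], file_lines: List[str]
-- ) -> Optional[Tuple[int, int]]:
--     """
--     Find exact content match in file and return (start_line, end_line).
--     Line numbers are 1-indexed.
--     """
--     if not content_lines or not file_lines:
--         return None
--
--     content_length = len(content_lines)
--
--     for i in range(len(file_lines) - content_length + 1):
--         # Check if content matches at this position
--         if file_lines[i : i + content_length] == content_lines: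
--             return (i + 1, i + content_length)  # 1-indexed
--
--     return None
-- ===== SOURCE B (Python) =====
-- from typing import List, Optional, Tuple
--
-- def _find_content_in_file(
--     content_lines: List[str], file_lines: List[str]
-- ) -> Optional[Tuple[int, int]]:
--     """Rabin-Karp over per-line hashes: a rolling window hash filters candidate
--     positions so the full line-by-line comparison runs only on hash hits."""
--     m = len(content_lines)
--     n = len(file_lines)
--     if m == 0 or n == 0 or m > n:
--         return None
--     MOD = 2305843009213693951
--     BASE = 1000003
--
--     def line_hash(s):
--         h = 0
--         for ch in s:
--             h = (h * 131 + ord(ch) + 1) % MOD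
--         return h
--
--     fh = [line_hash(s) for s in file_lines]
--     pat = 0
--     for s in content_lines:
--         pat = (pat * BASE + line_hash(s)) % MOD
--     pw = 1
--     for _ in range(m - 1):
--         pw = pw * BASE % MOD
--     cur = 0
--     for h in fh[:m]:
--         cur = (cur * BASE + h) % MOD
--     for i in range(n - m + 1):
--         if cur == pat and file_lines[i:i + m] == content_lines:
--             return (i + 1, i + m)
--         if i + m < n:
--             cur = ((cur - fh[i] * pw) * BASE + fh[i + m]) % MOD
--     return None
-- ===== Notes on version B (the rewrite author's own statement) =====
-- stated objective: alternative
-- what changed: Replaced the naive scan that compares a full m-line slice at every position with Rabin-Karp: per-line hashes plus a rolling window hash filter positions, so the full slice comparison runs only on hash hits.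
import Mathlib
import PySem

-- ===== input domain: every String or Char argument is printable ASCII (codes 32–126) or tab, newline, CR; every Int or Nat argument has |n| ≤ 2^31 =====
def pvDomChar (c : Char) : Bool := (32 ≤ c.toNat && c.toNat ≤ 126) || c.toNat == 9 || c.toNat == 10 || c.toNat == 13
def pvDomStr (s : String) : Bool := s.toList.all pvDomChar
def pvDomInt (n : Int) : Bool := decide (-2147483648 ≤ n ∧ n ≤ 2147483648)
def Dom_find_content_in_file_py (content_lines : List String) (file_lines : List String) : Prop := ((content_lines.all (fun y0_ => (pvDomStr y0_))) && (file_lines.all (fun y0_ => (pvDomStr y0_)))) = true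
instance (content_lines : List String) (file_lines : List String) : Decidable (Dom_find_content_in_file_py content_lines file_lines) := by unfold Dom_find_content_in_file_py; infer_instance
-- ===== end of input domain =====

-- B replaces A's naive scan (full m-line slice comparison at every position) by Rabin–Karp:
-- per-line hashes and a rolling window hash filter candidate positions, the full comparison
-- runs only on hash hits; same return value everywhere (objective: alternative algorithm).

-- ===== PORT A =====
def naiveLoop (content file : List String) (m : Int) : List Int → Option (Int × Int)
  | [] => none
  | i :: rest =>
      if PySem.List.slice file (some i) (some (i + m)) = content then some (i + 1, i + m)
      else naiveLoop content file m rest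

def find_content_in_file_py (content_lines : List String) (file_lines : List String) : Option (Int × Int) :=
  if content_lines = [] ∨ file_lines = [] then none
  else
    naiveLoop content_lines file_lines (content_lines.length : Int)
      (PySem.List.pyRange 0 ((file_lines.length : Int) - (content_lines.length : Int) + 1) 1)

-- ===== PORT B =====
def lineHash (s : String) : Int :=
  s.toList.foldl (fun h ch => PySem.Int.mod (h * 131 + (ch.toNat : Int) + 1) 2305843009213693951) 0

def rkLoop (content file : List String) (fh : List Int) (m n pat pw : Int) :
    List Int → Int → Option (Int × Int)
  | [], _ => none
  | i :: rest, cur =>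
      if cur = pat ∧ PySem.List.slice file (some i) (some (i + m)) = content then
        some (i + 1, i + m)
      else if i + m < n then
        rkLoop content file fh m n pat pw rest
          (PySem.Int.mod ((cur - PySem.List.pyGetD fh i 0 * pw) * 1000003 + PySem.List.pyGetD fh (i + m) 0) 2305843009213693951)
      else rkLoop content file fh m n pat pw rest cur

def find_content_in_file_py_alt (content_lines : List String) (file_lines : List String) : Option (Int × Int) :=
  let m : Int := content_lines.length
  let n : Int := file_lines.length
  if m = 0 ∨ n = 0 ∨ m > n then none
  else
    let fh := file_lines.map lineHash
    let pat := content_lines.foldl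
      (fun a s => PySem.Int.mod (a * 1000003 + lineHash s) 2305843009213693951) 0
    let pw := (PySem.List.pyRange 0 (m - 1) 1).foldl
      (fun p _ => PySem.Int.mod (p * 1000003) 2305843009213693951) 1
    let cur := (PySem.List.slice fh none (some m)).foldl
      (fun a h => PySem.Int.mod (a * 1000003 + h) 2305843009213693951) 0
    rkLoop content_lines file_lines fh m n pat pw (PySem.List.pyRange 0 (n - m + 1) 1) cur

-- ===== PRECONDITION & SPEC =====
def Spec_find_content_in_file_py (content_lines : List String) (file_lines : List String) (out : Option (Int × Int)) : Prop := out = find_content_in_file_py_alt content_lines file_lines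
instance (content_lines : List String) (file_lines : List String) (out : Option (Int × Int)) : Decidable (Spec_find_content_in_file_py content_lines file_lines out) := by unfold Spec_find_content_in_file_py; infer_instance

-- ===== CLAIM (what is proved, stated in full; the proofs are below) =====
def Claim_equal_find_content_in_file_py : Prop := ∀ (content_lines : List String) (file_lines : List String), Dom_find_content_in_file_py content_lines file_lines → Spec_find_content_in_file_py content_lines file_lines (find_content_in_file_py content_lines file_lines)

-- ===== LEMMAS AND PROOFS =====

-- pure (un-modded) polynomial value of a hash window
def polyP (hs : List Int) : Int := hs.foldl (fun a h => a * 1000003 + h) 0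
-- modded polynomial (exactly the fold both Pythons run)
def polyH (hs : List Int) : Int :=
  hs.foldl (fun a h => PySem.Int.mod (a * 1000003 + h) 2305843009213693951) 0

lemma modM (a : Int) : PySem.Int.mod a 2305843009213693951 = a % 2305843009213693951 :=
  PySem.Int.mod_eq_emod_of_pos (by norm_num)

lemma foldl_mod_eq (hs : List Int) : ∀ a : Int,
    hs.foldl (fun x h => PySem.Int.mod (x * 1000003 + h) 2305843009213693951) (a % 2305843009213693951)
      = (hs.foldl (fun x h => x * 1000003 + h) a) % 2305843009213693951 := by
  induction hs with
  | nil => intro a; simp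
  | cons h t ih =>
      intro a
      rw [List.foldl_cons, List.foldl_cons]
      have h1 : PySem.Int.mod (a % 2305843009213693951 * 1000003 + h) 2305843009213693951
          = (a * 1000003 + h) % 2305843009213693951 := by
        rw [modM]
        exact Int.ModEq.add_right h (Int.ModEq.mul_right 1000003 (Int.emod_emod_of_dvd a dvd_rfl))
      rw [h1]
      exact ih (a * 1000003 + h)

lemma polyH_eq (hs : List Int) : polyH hs = polyP hs % 2305843009213693951 := by
  have := foldl_mod_eq hs 0
  simpa [polyH, polyP] using this

lemma polyP_init (hs : List Int) : ∀ a : Int,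
    hs.foldl (fun x h => x * 1000003 + h) a = a * 1000003 ^ hs.length + polyP hs := by
  induction hs with
  | nil => intro a; simp [polyP]
  | cons h t ih =>
      intro a
      simp only [List.foldl_cons, List.length_cons, polyP]
      rw [ih (a * 1000003 + h), ih (0 * 1000003 + h)]
      ring

lemma polyP_cons (x : Int) (t : List Int) :
    polyP (x :: t) = x * 1000003 ^ t.length + polyP t := by
  simp only [polyP, List.foldl_cons]
  simpa using polyP_init t x

lemma polyP_append_singleton (t : List Int) (y : Int) :
    polyP (t ++ [y]) = polyP t * 1000003 + y := by
  simp [polyP, List.foldl_append]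

lemma pow_loop (k : Nat) :
    (PySem.List.pyRange 0 (k : Int) 1).foldl
        (fun p _ => PySem.Int.mod (p * 1000003) 2305843009213693951) 1
      = (1000003 : Int) ^ k % 2305843009213693951 := by
  induction k with
  | zero => simp [PySem.List.pyRange_one_eq_nil]
  | succ k ih =>
      have hcast : ((k + 1 : Nat) : Int) = (k : Int) + 1 := by push_cast; ring
      rw [hcast, PySem.List.pyRange_one_succ_right (by positivity), List.foldl_append, ih]
      simp only [List.foldl_cons, List.foldl_nil, modM]
      calc ((1000003:Int) ^ k % 2305843009213693951 * 1000003) % 2305843009213693951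
          = ((1000003:Int) ^ k * 1000003) % 2305843009213693951 :=
            Int.ModEq.mul_right 1000003 (Int.emod_emod_of_dvd _ dvd_rfl)
        _ = (1000003:Int) ^ (k + 1) % 2305843009213693951 := by ring_nf

-- the rolling-hash update is exact: it turns the window hash at i into the window hash at i+1
lemma roll (fh : List Int) (i m : Nat) (him : i + m < fh.length) (hm : 0 < m)
    (cur pw : Int)
    (hcur : cur = polyH ((fh.drop i).take m))
    (hpw : pw % 2305843009213693951 = (1000003 : Int) ^ (m - 1) % 2305843009213693951) :
    PySem.Int.mod ((cur - PySem.List.pyGetD fh (i : Int) 0 * pw) * 1000003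
        + PySem.List.pyGetD fh ((i : Int) + (m : Int)) 0) 2305843009213693951
      = polyH ((fh.drop (i + 1)).take m) := by
  have hi : i < fh.length := by omega
  have him' : i + m < fh.length := him
  have hx : PySem.List.pyGetD fh (i : Int) 0 = fh[i] := by
    simp [PySem.List.pyGetD_natCast, List.getD_eq_getElem?_getD, List.getElem?_eq_getElem hi]
  have hcast : ((i : Int) + (m : Int)) = ((i + m : Nat) : Int) := by push_cast; ring
  have hy : PySem.List.pyGetD fh ((i : Int) + (m : Int)) 0 = fh[i + m] := by
    rw [hcast, PySem.List.pyGetD_natCast]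
    simp [List.getD_eq_getElem?_getD, List.getElem?_eq_getElem him']
  have htlen : ((fh.drop (i + 1)).take (m - 1)).length = m - 1 := by
    simp [List.length_take, List.length_drop]; omega
  have hwi : (fh.drop i).take m = fh[i] :: (fh.drop (i + 1)).take (m - 1) := by
    obtain ⟨k, rfl⟩ : ∃ k, m = k + 1 := ⟨m - 1, by omega⟩
    rw [List.drop_eq_getElem_cons hi, List.take_succ_cons]
    simp
  have hwi1 : (fh.drop (i + 1)).take m = (fh.drop (i + 1)).take (m - 1) ++ [fh[i + m]] := by
    obtain ⟨k, rfl⟩ : ∃ k, m = k + 1 := ⟨m - 1, by omega⟩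
    rw [List.take_add_one]
    have h2 : (fh.drop (i + 1))[k]? = some fh[i + (k + 1)] := by
      rw [List.getElem?_drop, List.getElem?_eq_getElem (by omega : i + 1 + k < fh.length)]
      exact congrArg some (by congr 1; omega)
    rw [h2]
    simp
  rw [modM, hcur, hx, hy, hwi, hwi1, polyH_eq, polyH_eq, polyP_cons, polyP_append_singleton, htlen]
  have step1 : ((fh[i] * 1000003 ^ (m-1) + polyP ((fh.drop (i + 1)).take (m - 1))) % 2305843009213693951 - fh[i] * pw) * 1000003 + fh[i+m]
      ≡ ((fh[i] * 1000003 ^ (m-1) + polyP ((fh.drop (i + 1)).take (m - 1))) - fh[i] * 1000003 ^ (m-1)) * 1000003 + fh[i+m]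
        [ZMOD 2305843009213693951] := by
    refine Int.ModEq.add_right _ (Int.ModEq.mul_right _ (Int.ModEq.sub ?_ (Int.ModEq.mul_left _ ?_)))
    · exact Int.emod_emod_of_dvd _ dvd_rfl
    · exact hpw
  calc ((fh[i] * 1000003 ^ (m-1) + polyP ((fh.drop (i + 1)).take (m - 1))) % 2305843009213693951 - fh[i] * pw) * 1000003 + fh[i+m]
        ≡ ((fh[i] * 1000003 ^ (m-1) + polyP ((fh.drop (i + 1)).take (m - 1))) - fh[i] * 1000003 ^ (m-1)) * 1000003 + fh[i+m]
          [ZMOD 2305843009213693951] := step1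
    _ = polyP ((fh.drop (i + 1)).take (m - 1)) * 1000003 + fh[i+m] := by ring

-- pattern hash of the port equals polyH of the mapped content lines
lemma pat_eq (c : List String) :
    c.foldl (fun a s => PySem.Int.mod (a * 1000003 + lineHash s) 2305843009213693951) 0
      = polyH (c.map lineHash) := by
  simp [polyH, List.foldl_map]

-- main loop equivalence, by induction on the remaining range length
lemma loop_eq (c f : List String) (hc : c ≠ []) (pat pw : Int)
    (hpat : pat = polyH (c.map lineHash))
    (hpw : pw % 2305843009213693951 = (1000003 : Int) ^ (c.length - 1) % 2305843009213693951) :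
    ∀ (d i : Nat) (cur : Int),
      (i : Int) + (d : Int) = (f.length : Int) - (c.length : Int) + 1 →
      cur = polyH (((f.map lineHash).drop i).take c.length) →
      rkLoop c f (f.map lineHash) (c.length : Int) (f.length : Int) pat pw
          (PySem.List.pyRange (i : Int) ((f.length : Int) - (c.length : Int) + 1) 1) cur
        = naiveLoop c f (c.length : Int)
            (PySem.List.pyRange (i : Int) ((f.length : Int) - (c.length : Int) + 1) 1) := by
  intro d
  induction d with
  | zero =>
      intro i cur hsum _
      rw [PySem.List.pyRange_one_eq_nil (by omega)]
      rfl
  | succ d ih =>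
      intro i cur hsum hcur
      have hm : 0 < c.length := List.length_pos_iff.mpr hc
      have hlt : (i : Int) < (f.length : Int) - (c.length : Int) + 1 := by push_cast at hsum ⊢; omega
      rw [PySem.List.pyRange_one_cons hlt]
      have hslice : PySem.List.slice f (some (i : Int)) (some ((i : Int) + (c.length : Int)))
          = (f.drop i).take c.length := PySem.List.slice_natCast_add f i c.length
      by_cases hmatch : (f.drop i).take c.length = c
      · have hcurpat : cur = pat := by
          rw [hcur, hpat, ← List.map_drop, ← List.map_take, hmatch]
        simp only [rkLoop, naiveLoop, hslice, hmatch, hcurpat, and_self, if_pos]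
      · have hA : ¬ (PySem.List.slice f (some (i:Int)) (some ((i:Int) + (c.length:Int))) = c) := by
          rw [hslice]; exact hmatch
        have hB : ¬ (cur = pat ∧ PySem.List.slice f (some (i : Int)) (some ((i : Int) + (c.length : Int))) = c) :=
          fun hand => hA hand.2
        simp only [rkLoop, naiveLoop, if_neg hA, if_neg hB]
        by_cases hstep : (i : Int) + (c.length : Int) < (f.length : Int)
        · rw [if_pos hstep]
          have hstep' : i + c.length < f.length := by exact_mod_cast (by push_cast at hstep ⊢; omega : ((i + c.length : Nat) : Int) < (f.length : Int))
          have hfh : i + c.length < (f.map lineHash).length := by simpa using hstep'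
          have hroll := roll (f.map lineHash) i c.length hfh hm cur pw hcur hpw
          have hcast1 : ((i + 1 : Nat) : Int) = (i : Int) + 1 := by push_cast; ring
          have := ih (i + 1) _ (by push_cast at hsum ⊢; omega) hroll
          rw [hcast1] at this
          rw [this]
        · rw [if_neg hstep]
          -- i is the last position: the remaining range is empty
          have hempty : PySem.List.pyRange ((i : Int) + 1) ((f.length : Int) - (c.length : Int) + 1) 1 = [] :=
            PySem.List.pyRange_one_eq_nil (by omega)
          rw [hempty]
          rfl

-- ===== VERDICT (by name: the statement is the Claim_ definition above) =====
theorem find_content_in_file_py_spec : Claim_equal_find_content_in_file_py := by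
  intro c f _
  unfold Spec_find_content_in_file_py find_content_in_file_py find_content_in_file_py_alt
  by_cases hc : c = []
  · subst hc; simp
  by_cases hf : f = []
  · subst hf; simp
  have hm : 0 < c.length := List.length_pos_iff.mpr hc
  have hn : 0 < f.length := List.length_pos_iff.mpr hf
  rw [if_neg (by tauto)]
  by_cases hmn : (c.length : Int) > (f.length : Int)
  · rw [if_pos (by tauto)]
    rw [PySem.List.pyRange_one_eq_nil (by omega)]
    rfl
  · rw [if_neg (by omega)]
    have hpat := pat_eq c
    have hpw : ((PySem.List.pyRange 0 ((c.length : Int) - 1) 1).foldl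
        (fun p _ => PySem.Int.mod (p * 1000003) 2305843009213693951) 1) % 2305843009213693951
        = (1000003 : Int) ^ (c.length - 1) % 2305843009213693951 := by
      have hcast : ((c.length - 1 : Nat) : Int) = (c.length : Int) - 1 := by omega
      rw [← hcast, pow_loop]
      exact Int.emod_emod_of_dvd _ dvd_rfl
    have hcur : (PySem.List.slice (f.map lineHash) none (some (c.length : Int))).foldl
        (fun a h => PySem.Int.mod (a * 1000003 + h) 2305843009213693951) 0
        = polyH (((f.map lineHash).drop 0).take c.length) := by
      rw [PySem.List.slice_to_natCast]
      simp [polyH]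
    have h0 : ((0 : Nat) : Int) = 0 := rfl
    have := loop_eq c f hc _ _ hpat hpw
      ((f.length - c.length + 1 : Nat)) 0
      ((PySem.List.slice (f.map lineHash) none (some (c.length : Int))).foldl
        (fun a h => PySem.Int.mod (a * 1000003 + h) 2305843009213693951) 0)
      (by omega) hcur
    rw [h0] at this
    exact this.symm
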